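-- pv_equiv track=rewrite | github.com/AlexP210/NSERC_Project | DataProcessing/My_Library.py | find_species
-- ===== SOURCE A (Python) =====
-- def increment_index_state(index_state, species_for_chains):
--     index_state = list(index_state)
--     for idx_idx in range(len(index_state)):
--         if index_state[idx_idx] < len(species_for_chains[idx_idx]) - 1:
--             index_state[idx_idx] += 1
--             break
--         else:
--             index_state[idx_idx] = 0
--     return tuple(index_state)
--
-- def find_species(species_for_chains):
--     # # # This function is generalized to work for n-mers, where we don't know how many sub-lists there are # # #
--     # Can try implementing recursion later
--
--     # Check if we actually have species for all the chains. If not, return False, None to avoid IndexError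
--     if sum([species_list == [] for species_list in species_for_chains]) > 0: return False, None
--     # 1. Pick a species for the first chain, call this species A
--     # 2. Look at all the species in the next chain, see if any of them match species A
--     # 3. If yes, go to the next chain. If no, go back to the previous chain and pick the next species
--     # 4. If we can "find a path" through all the chains, then return True, and that species.
--     # 5. If we do not find a path, return False and None
--     index_state = tuple( (0 for _ in range(len(species_for_chains))) )
--     initial = True
--     while initial or index_state != tuple( (0 for _ in range(len(species_for_chains))) ):
--         initial = False
--         species = [species_for_chains[idx_idx][index_state[idx_idx]] for idx_idx in range(len(index_state))]
--         initial_specie = species[0]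
--         found_species = True
--         for specie in species:
--             if specie != initial_specie:
--                 index_state = increment_index_state(index_state, species_for_chains)
--                 found_species = False
--                 break
--         if found_species:
--             return True, initial_specie
--     return False, None
-- ===== SOURCE B (Python) =====
-- def find_species(species_for_chains):
--     # Returns (True, s) for a species common to all chains (the one A's odometer
--     # search would find), else (False, None).
--     if not species_for_chains or any(not chain for chain in species_for_chains):
--         return False, None
--     other_sets = [set(chain) for chain in species_for_chains[:-1]]
--     for s in species_for_chains[-1]:
--         if all(s in o for o in other_sets):
--             return True, s
--     return False, None
-- ===== Notes on version B (the rewrite author's own statement) =====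
-- stated objective: faster
-- what changed: A enumerates every combination of per-chain indices with an odometer and tests each combination for all-equal species; B scans only the last chain once, checking each of its species for membership in precomputed sets of the other chains, which yields the same species (the first common one in the last chain) without enumerating the cross product.
import Mathlib
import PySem

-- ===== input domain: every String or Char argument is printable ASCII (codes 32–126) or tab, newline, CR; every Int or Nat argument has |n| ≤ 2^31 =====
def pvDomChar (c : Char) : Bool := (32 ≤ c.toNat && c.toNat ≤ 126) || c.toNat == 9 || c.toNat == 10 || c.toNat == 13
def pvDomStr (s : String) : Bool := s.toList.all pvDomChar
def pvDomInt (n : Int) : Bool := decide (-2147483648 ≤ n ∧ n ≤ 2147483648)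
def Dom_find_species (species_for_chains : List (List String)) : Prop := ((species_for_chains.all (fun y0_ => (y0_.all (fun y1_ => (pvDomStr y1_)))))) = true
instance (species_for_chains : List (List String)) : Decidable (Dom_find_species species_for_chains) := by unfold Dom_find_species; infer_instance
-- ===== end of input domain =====

-- B replaces A's odometer enumeration of all index combinations by a single scan of the
-- last chain against membership sets of the other chains (objective: faster, asymptotic).


-- ===== PORT A =====
-- increment_index_state: bump the first position that can still grow, zero the ones
-- before it (state and chains always have equal length at every call site).
def incStateAux : List Nat → List (List String) → List Nat
  | [], _ => []
  | d :: ds, [] => d :: ds          -- unreachable: lengths are equal at every call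
  | d :: ds, c :: cs => if d < c.length - 1 then (d + 1) :: ds else 0 :: incStateAux ds cs

-- species = [chains[j][state[j]] for j in range(len(state))]; indices are in range at
-- every call (no empty chain passed the guard), so getD is exact there.
def speciesOf : List Nat → List (List String) → List String
  | [], _ => []
  | ds, [] => ds.map (fun _ => "")  -- unreachable: lengths are equal at every call
  | d :: ds, c :: cs => c.getD d "" :: speciesOf ds cs

def prodLen (cs : List (List String)) : Nat := (cs.map List.length).prod

-- The while loop. Its body runs once per index state, in odometer order, and stops when
-- the state returns to all zeros: that is exactly (product of chain lengths) iterations,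
-- used here as the fuel; fuel 0 is the loop's exit (return False, None).
def loopA (chains : List (List String)) : List Nat → Nat → Bool × Option String
  | _, 0 => (false, none)
  | state, fuel + 1 =>
    let species := speciesOf state chains
    let initial := species.headD ""
    if species.all (· == initial) then (true, some initial)
    else loopA chains (incStateAux state chains) fuel

def find_species (species_for_chains : List (List String)) : Bool × Option String :=
  if 0 < species_for_chains.countP (fun c => c == []) then (false, none)
  else loopA species_for_chains (List.replicate species_for_chains.length 0)
        (prodLen species_for_chains)

-- ===== PORT B =====
def find_species_alt (species_for_chains : List (List String)) : Bool × Option String :=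
  if species_for_chains.isEmpty || species_for_chains.any (fun c => c.isEmpty) then
    (false, none)
  else
    let otherSets := species_for_chains.dropLast.map (fun c => PySem.Set.ofList c)
    match (species_for_chains.getLastD []).find?
        (fun s => otherSets.all (fun o => PySem.Set.contains o s)) with
    | some s => (true, some s)
    | none => (false, none)

-- ===== PRECONDITION & SPEC =====
-- Pre_ excludes only the empty outer list, on which Python A raises IndexError.
def Pre_find_species (species_for_chains : List (List String)) : Prop :=
  species_for_chains ≠ []
instance (species_for_chains : List (List String)) : Decidable (Pre_find_species species_for_chains) := by unfold Pre_find_species; infer_instance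
def pvWitness_find_species : List (List String) := [["A", "B"], ["B"]]

def Spec_find_species (species_for_chains : List (List String)) (out : Bool × Option String) : Prop := out = find_species_alt species_for_chains
instance (species_for_chains : List (List String)) (out : Bool × Option String) : Decidable (Spec_find_species species_for_chains out) := by unfold Spec_find_species; infer_instance

-- ===== CLAIM (what is proved, stated in full; the proofs are below) =====
def Claim_equal_find_species : Prop := ∀ (species_for_chains : List (List String)), Dom_find_species species_for_chains → Pre_find_species species_for_chains → Spec_find_species species_for_chains (find_species species_for_chains)

-- ===== LEMMAS AND PROOFS =====

-- Mixed-radix decoding of an odometer value into an index state (digit 0 fastest).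
def decSt : Nat → List (List String) → List Nat
  | _, [] => []
  | n, c :: cs => (n % c.length) :: decSt (n / c.length) cs

-- The species list read off directly from the value.
def spN : Nat → List (List String) → List String
  | _, [] => []
  | n, c :: cs => c.getD (n % c.length) "" :: spN (n / c.length) cs

-- Loop-body test at value n, with an accumulated predicate p on the candidate species.
def G (p : String → Bool) (cs : List (List String)) (n : Nat) : Option String :=
  let l := spN n cs
  let h := l.headD ""
  if p h && l.all (· == h) then some h else none

def toRes : Option String → Bool × Option String
  | some s => (true, some s)
  | none => (false, none)

theorem speciesOf_decSt (cs : List (List String)) (n : Nat) :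
    speciesOf (decSt n cs) cs = spN n cs := by
  induction cs generalizing n with
  | nil => simp [speciesOf, decSt, spN]
  | cons c cs ih => simp [speciesOf, decSt, spN, ih]

theorem decSt_zero (cs : List (List String)) :
    decSt 0 cs = List.replicate cs.length 0 := by
  induction cs with
  | nil => simp [decSt]
  | cons c cs ih => simp [decSt, ih, List.replicate_succ]

theorem inc_decSt (cs : List (List String)) (n : Nat)
    (hne : ∀ c ∈ cs, c ≠ []) (hlt : n + 1 < prodLen cs) :
    incStateAux (decSt n cs) cs = decSt (n + 1) cs := by
  induction cs generalizing n with
  | nil => simp [prodLen] at hlt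
  | cons c cs ih =>
    have hL : 0 < c.length := List.length_pos_iff.mpr (hne c (by simp))
    have hP : prodLen (c :: cs) = c.length * prodLen cs := by simp [prodLen]
    by_cases hd : n % c.length < c.length - 1
    · have h1 : n % c.length + 1 < c.length := by omega
      have hmod : (n + 1) % c.length = n % c.length + 1 := by
        conv_lhs => rw [show n + 1 = (n % c.length + 1) + c.length * (n / c.length) by
          have := Nat.mod_add_div n c.length; omega]
        rw [Nat.add_mul_mod_self_left, Nat.mod_eq_of_lt h1]
      have hdiv : (n + 1) / c.length = n / c.length := by
        conv_lhs => rw [show n + 1 = (n % c.length + 1) + c.length * (n / c.length) by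
          have := Nat.mod_add_div n c.length; omega]
        rw [Nat.add_mul_div_left _ _ hL, Nat.div_eq_of_lt h1, Nat.zero_add]
      simp [incStateAux, decSt, hd, hmod, hdiv]
    · have hd' : n % c.length = c.length - 1 := by
        have := Nat.mod_lt n hL; omega
      have hsplit : n + 1 = c.length * (n / c.length + 1) := by
        have := Nat.mod_add_div n c.length
        rw [Nat.mul_add, Nat.mul_one]; omega
      have hmod : (n + 1) % c.length = 0 := by
        rw [hsplit, Nat.mul_mod_right]
      have hdiv : (n + 1) / c.length = n / c.length + 1 := by
        rw [hsplit, Nat.mul_div_cancel_left _ hL]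
      have hlt' : n / c.length + 1 + 1 ≤ prodLen cs + 1 := by
        have h2 : c.length * (n / c.length + 1) < c.length * prodLen cs := by
          rw [← hsplit]; rw [hP] at hlt; omega
        have := Nat.lt_of_mul_lt_mul_left h2; omega
      rcases Nat.lt_or_ge (n / c.length + 1) (prodLen cs) with hc | hc
      · simp [incStateAux, decSt, hd, hmod, hdiv,
          ih _ (fun c hc => hne c (by simp [hc])) hc]
      · -- wrap of the suffix cannot happen below the bound
        exfalso
        have : n / c.length + 1 = prodLen cs := by omega
        have : n + 1 = c.length * prodLen cs := by rw [hsplit, this]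
        rw [hP] at hlt; omega

theorem findSome?_congr_mem {α β : Type} (l : List α) (f g : α → Option β)
    (h : ∀ a ∈ l, f a = g a) : l.findSome? f = l.findSome? g := by
  induction l with
  | nil => rfl
  | cons a l ih =>
    rw [List.findSome?_cons, List.findSome?_cons, h a (by simp),
      ih (fun a ha => h a (by simp [ha]))]

theorem range'_shift {α : Type} (a n : Nat) (f : Nat → Option α) :
    (List.range' a n).findSome? f = (List.range' 0 n).findSome? (fun d => f (a + d)) := by
  rw [List.range'_eq_map_range, List.findSome?_map, List.range_eq_range']
  rfl

theorem range'_mul_findSome? {α : Type} (M L : Nat) (f : Nat → Option α) :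
    (List.range' 0 (L * M)).findSome? f
      = (List.range' 0 M).findSome? (fun m => (List.range' (L * m) L).findSome? f) := by
  induction M with
  | zero => simp
  | succ M ih =>
    have h1 : List.range' 0 (L * (M + 1)) = List.range' 0 (L * M) ++ List.range' (L * M) L := by
      have h := (List.range'_append (s := 0) (m := L * M) (n := L) (step := 1)).symm
      simpa [Nat.mul_add] using h
    have h2 : List.range' 0 (M + 1) = List.range' 0 M ++ [M] := by
      simpa using (List.range'_concat (s := 0) (n := M) (step := 1))
    rw [h1, h2, List.findSome?_append, List.findSome?_append, ih]
    cases hx : (List.range' 0 M).findSome? (fun m => (List.range' (L * m) L).findSome? f) <;>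
      cases hz : (List.range' (L * M) L).findSome? f <;>
        simp [hx, hz, List.findSome?]

theorem scan_getD {α : Type} (c : List String) (f : String → Option α) :
    (List.range' 0 c.length).findSome? (fun d => f (c.getD d "")) = c.findSome? f := by
  induction c with
  | nil => simp
  | cons x c ih =>
    rw [List.length_cons, List.range'_succ, List.findSome?_cons]
    have : (List.range' 1 c.length).findSome? (fun d => f ((x :: c).getD d ""))
        = (List.range' 0 c.length).findSome? (fun d => f (c.getD d "")) := by
      rw [range'_shift]
      refine findSome?_congr_mem _ _ _ (fun d _ => ?_)
      simp [Nat.add_comm 1 d]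
    rw [this, ih]
    cases f x <;> simp [List.findSome?_cons]

theorem mem_scan (c : List String) (s : String) :
    c.findSome? (fun x => if x == s then some s else none)
      = if s ∈ c then some s else none := by
  induction c with
  | nil => simp
  | cons x c ih =>
    rw [List.findSome?_cons]
    by_cases hx : x = s
    · simp [hx]
    · have hb : (x == s) = false := by simp [hx]
      rw [hb]
      simp only [Bool.false_eq_true, if_false, ih]
      simp [show ¬ s = x from fun h => hx h.symm]

theorem find?_as_findSome? (c : List String) (p : String → Bool) :
    c.findSome? (fun x => if p x then some x else none) = c.find? p := by
  induction c with
  | nil => simp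
  | cons x c ih =>
    by_cases hx : p x <;> simp [List.findSome?_cons, List.find?_cons, hx, ih]

theorem G_step (p : String → Bool) (c : List String) (cs : List (List String))
    (hcs : cs ≠ []) (n : Nat) :
    G p (c :: cs) n
      = match G p cs (n / c.length) with
        | some s => if c.getD (n % c.length) "" == s then some s else none
        | none => none := by
  obtain ⟨c2, cs', rfl⟩ := List.exists_cons_of_ne_nil hcs
  simp only [G, spN, List.headD_cons, List.all_cons]
  generalize c.getD (n % c.length) "" = a
  generalize c2.getD (n / c.length % c2.length) "" = b
  generalize spN (n / c.length / c2.length) cs' = r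
  by_cases hab : a = b
  · subst hab
    simp only [beq_self_eq_true, Bool.true_and]
    split <;> simp
  · have hba : (b == a) = false := by simp [Ne.symm hab]
    have hab' : (a == b) = false := by simp [hab]
    simp only [beq_self_eq_true, Bool.true_and, hba, Bool.false_and, Bool.and_false]
    split
    · simp_all
    · split
      · rename_i s hs
        have hsb : s = b := by
          by_cases hC : (p b && r.all fun x => x == b) = true
          · rw [if_pos hC] at hs; exact (Option.some.inj hs).symm
          · rw [if_neg hC] at hs; cases hs
        subst hsb
        simp [hab']
      · rfl

theorem findSome?_bind_mem (c : List String) (o : Option String) :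
    (List.range' 0 c.length).findSome?
        (fun d => o.bind (fun s => if c.getD d "" == s then some s else none))
      = o.bind (fun s => if s ∈ c then some s else none) := by
  cases o with
  | none => simp [List.findSome?_eq_none_iff]
  | some s =>
    simpa using (scan_getD c (fun x => if x == s then some s else none)).trans (mem_scan c s)

theorem G_filter (p : String → Bool) (c : List String) (cs : List (List String)) (m : Nat) :
    (G p cs m).bind (fun s => if s ∈ c then some s else none)
      = G (fun s => p s && c.contains s) cs m := by
  simp only [G]
  cases ha : (spN m cs).all (· == (spN m cs).headD "") with
  | false => simp
  | true =>
    generalize (spN m cs).headD "" = h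
    by_cases hp : p h = true
    · by_cases hm : h ∈ c <;>
        simp [hp, hm, List.contains_iff_mem]
    · have hp' : p h = false := by simpa using hp
      simp [hp']

theorem GEN (cs : List (List String)) (p : String → Bool)
    (hne : cs ≠ []) (hall : ∀ c ∈ cs, c ≠ []) :
    (List.range' 0 (prodLen cs)).findSome? (G p cs)
      = (cs.getLastD []).find?
          (fun s => p s && cs.dropLast.all (fun c => c.contains s)) := by
  induction cs generalizing p with
  | nil => exact absurd rfl hne
  | cons c cs ih =>
    cases cs with
    | nil =>
      -- single chain: the odometer is a plain scan of c
      have hp : prodLen [c] = c.length := by simp [prodLen]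
      rw [hp]
      have h1 : ∀ n ∈ List.range' 0 c.length,
          G p [c] n = (fun x => if p x then some x else none) (c.getD n "") := by
        intro n hn
        have hn' : n < c.length := by
          have := List.mem_range'_1.mp hn; omega
        simp [G, spN, Nat.mod_eq_of_lt hn', List.all_cons]
      rw [findSome?_congr_mem _ _ _ h1,
        scan_getD c (fun x => if p x then some x else none), find?_as_findSome?]
      simp
    | cons c2 cs' =>
      have hcs : (c2 :: cs') ≠ [] := by simp
      have hL : 0 < c.length := List.length_pos_iff.mpr (hall c (by simp))
      have hp : prodLen (c :: c2 :: cs') = c.length * prodLen (c2 :: cs') := by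
        simp [prodLen]
      rw [hp, range'_mul_findSome?]
      have hinner : ∀ m ∈ List.range' 0 (prodLen (c2 :: cs')),
          (List.range' (c.length * m) c.length).findSome? (G p (c :: c2 :: cs'))
            = G (fun s => p s && c.contains s) (c2 :: cs') m := by
        intro m _
        rw [range'_shift]
        have h2 : ∀ d ∈ List.range' 0 c.length,
            G p (c :: c2 :: cs') (c.length * m + d)
              = (G p (c2 :: cs') m).bind
                  (fun s => if c.getD d "" == s then some s else none) := by
          intro d hd
          have hd' : d < c.length := by
            have := List.mem_range'_1.mp hd; omega
          have hdiv : (c.length * m + d) / c.length = m := by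
            rw [Nat.mul_add_div hL, Nat.div_eq_of_lt hd', Nat.add_zero]
          have hmod : (c.length * m + d) % c.length = d := by
            rw [Nat.mul_add_mod, Nat.mod_eq_of_lt hd']
          rw [G_step p c (c2 :: cs') hcs, hdiv, hmod]
          cases G p (c2 :: cs') m <;> rfl
        rw [findSome?_congr_mem _ _ _ h2,
          findSome?_bind_mem c (G p (c2 :: cs') m), G_filter]
      rw [findSome?_congr_mem _ _ _ hinner,
        ih (fun s => p s && c.contains s) hcs (fun x hx => hall x (by simp [hx]))]
      have hlast : (c :: c2 :: cs').getLastD [] = (c2 :: cs').getLastD [] := by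
        simp [List.getLastD_cons]
      have hdrop : (c :: c2 :: cs').dropLast = c :: (c2 :: cs').dropLast := by
        simp
      rw [hlast, hdrop]
      congr 1
      funext s
      by_cases h1 : p s <;> by_cases h2 : c.contains s <;>
        simp [h1, h2, List.all_cons, Bool.and_assoc]

theorem loopA_succ (chains : List (List String)) (state : List Nat) (fuel : Nat) :
    loopA chains state (fuel + 1)
      = (if ((speciesOf state chains).all (· == (speciesOf state chains).headD "")) = true
          then (true, some ((speciesOf state chains).headD ""))
          else loopA chains (incStateAux state chains) fuel) := rfl

theorem LOOP (chains : List (List String)) (hall : ∀ c ∈ chains, c ≠ []) :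
    ∀ (fuel n : Nat), n + fuel = prodLen chains →
    loopA chains (decSt n chains) fuel
      = toRes ((List.range' n fuel).findSome? (G (fun _ => true) chains)) := by
  intro fuel
  induction fuel with
  | zero => intro n _; simp [loopA, toRes]
  | succ fuel ih =>
    intro n hn
    rw [List.range'_succ, List.findSome?_cons, loopA_succ, speciesOf_decSt]
    by_cases hc : ((spN n chains).all (· == (spN n chains).headD "")) = true
    · rw [if_pos hc]
      have hG : G (fun _ => true) chains n = some ((spN n chains).headD "") := by
        simp only [G]
        rw [if_pos (by rw [hc]; simp)]
      rw [hG]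
      simp [toRes]
    · rw [if_neg hc]
      have hc' : ((spN n chains).all (· == (spN n chains).headD "")) = false := by
        revert hc; cases ((spN n chains).all (· == (spN n chains).headD "")) <;> simp
      have hG : G (fun _ => true) chains n = none := by
        simp only [G]
        rw [if_neg (by rw [hc']; simp)]
      rw [hG]
      cases fuel with
      | zero => simp [loopA, toRes]
      | succ f =>
        have hlt : n + 1 < prodLen chains := by omega
        rw [inc_decSt chains n hall hlt]
        exact ih (n + 1) (by omega)

theorem contains_ofList (c : List String) (s : String) :
    PySem.Set.contains (PySem.Set.ofList c) s = c.contains s := by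
  by_cases h : s ∈ c <;>
    simp [PySem.Set.contains, PySem.Set.mem_ofList, h, List.contains_iff_mem]

-- ===== VERDICT (by name: the statement is the Claim_ definition above) =====
theorem find_species_spec : Claim_equal_find_species := by
  intro chains _ hpre
  unfold Spec_find_species find_species find_species_alt
  by_cases hempty : ∃ c ∈ chains, c = []
  · obtain ⟨c0, hc0, rfl⟩ := hempty
    have h1 : 0 < chains.countP (fun c => c == []) :=
      List.countP_pos_iff.mpr ⟨[], hc0, by simp⟩
    have h2 : (chains.isEmpty || chains.any fun c => c.isEmpty) = true := by
      simp only [Bool.or_eq_true, List.any_eq_true]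
      exact Or.inr ⟨[], hc0, by simp⟩
    rw [if_pos h1, if_pos h2]
  · have hall : ∀ c ∈ chains, c ≠ [] := by
      intro c hc hceq; exact hempty ⟨c, hc, hceq⟩
    have hnil : chains ≠ [] := hpre
    have h1 : ¬ 0 < chains.countP (fun c => c == []) := by
      simp only [List.countP_pos_iff, not_exists]
      intro c; rintro ⟨hc, hceq⟩
      exact hall c hc (by simpa using hceq)
    have h2 : ¬ (chains.isEmpty || chains.any fun c => c.isEmpty) = true := by
      simp only [Bool.or_eq_true, List.any_eq_true, List.isEmpty_iff]
      rintro (h | ⟨c, hc, hce⟩)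
      · exact hnil h
      · exact hall c hc (by simpa using hce)
    rw [if_neg h1, if_neg h2]
    rw [← decSt_zero, LOOP chains hall (prodLen chains) 0 (by omega),
      GEN chains (fun _ => true) hnil hall]
    have hpred : (fun s => (chains.dropLast.map (fun c => PySem.Set.ofList c)).all
          (fun o => PySem.Set.contains o s))
        = (fun s => true && chains.dropLast.all fun c => c.contains s) := by
      funext s
      simp only [Bool.true_and, List.all_map]
      congr 1
      funext c
      exact contains_ofList c s
    simp only [hpred]
    cases hf : (chains.getLastD []).find?
        (fun s => true && chains.dropLast.all fun c => c.contains s) <;>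
      simp [toRes, hf]
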